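-- pv_equiv track=rewrite | github.com/xfd997700/unibiomap-demo | utils.py | repair_smpdb_name
-- ===== SOURCE A (Python) =====
-- from collections import defaultdict
--
-- def repair_smpdb_name(pathway_dict):
--     smp_dict = {
--         k: v['name'] for k, v in pathway_dict.items() if k.startswith('SMP')
--     }
--     reverse_map = defaultdict(list)
--
--     for key, value in smp_dict.items():
--         reverse_map[value].append(key)
--
--     # 筛选出有多个key的value
--     result = [values for values in reverse_map.values() if len(values) > 1]
--     result = [item for sublist in result for item in sublist]
--
--     for k in result:
--         pathway_dict[k]['name'] = pathway_dict[k]['name'] + f" ({k})"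
--     return pathway_dict
-- ===== SOURCE B (Python) =====
-- def repair_smpdb_name(pathway_dict):
--     smp_pairs = [(k, v['name']) for k, v in pathway_dict.items() if k.startswith('SMP')]
--     for k, v in pathway_dict.items():
--         if k.startswith('SMP') and any(
--             k2 != k and name == v['name'] for k2, name in smp_pairs
--         ):
--             v['name'] = v['name'] + f" ({k})"
--     return pathway_dict
-- ===== Notes on version B (the rewrite author's own statement) =====
-- stated objective: alternative
-- what changed: Replaces A's reverse map of name->key-lists, len>1 filter, flatten and keyed update loop with a snapshot of the SMP entries' (key, name) pairs and one pass that renames an entry exactly when some OTHER snapshot pair carries the same name (an existential pairwise test instead of grouping/counting).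
import Mathlib
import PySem

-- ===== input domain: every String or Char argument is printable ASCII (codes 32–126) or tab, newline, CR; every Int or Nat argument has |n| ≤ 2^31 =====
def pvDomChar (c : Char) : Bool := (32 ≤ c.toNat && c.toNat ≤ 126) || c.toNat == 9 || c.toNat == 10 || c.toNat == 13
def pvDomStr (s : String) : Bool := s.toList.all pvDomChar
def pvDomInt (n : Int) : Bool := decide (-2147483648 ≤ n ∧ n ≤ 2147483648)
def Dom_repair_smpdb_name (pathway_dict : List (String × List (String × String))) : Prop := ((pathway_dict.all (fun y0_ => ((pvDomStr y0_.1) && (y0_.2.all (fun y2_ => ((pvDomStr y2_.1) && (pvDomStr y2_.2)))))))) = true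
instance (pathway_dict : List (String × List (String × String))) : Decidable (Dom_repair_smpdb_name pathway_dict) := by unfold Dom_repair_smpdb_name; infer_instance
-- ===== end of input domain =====

-- B replaces A's reverse map / len>1 filter / flatten / keyed update loop by a snapshot of the SMP
-- (key, name) pairs and one pass renaming an entry iff some OTHER snapshot pair has the same name
-- (objective: alternative).  Both Pythons mutate the inner dicts of the argument in place in the
-- same way; the theorems here are about the return value.

-- shared elementary pieces (the same Python expressions occur verbatim in A and B):
-- v['name']  (the value read; Pre_ guarantees the key is present where it is read)
def pvGetName (v : List (String × String)) : String :=
  ((PySem.Dict.mk v).get? "name").getD ""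
-- k.startswith('SMP')
def pvIsSMP (k : String) : Bool := PySem.Str.startswith k "SMP"
-- d['name'] = d['name'] + f" ({k})"  performed on the entry (k, d)
def pvRename (kv : String × List (String × String)) : String × List (String × String) :=
  (kv.1, ((PySem.Dict.mk kv.2).insert "name" (pvGetName kv.2 ++ " (" ++ kv.1 ++ ")")).items)

-- ===== PORT A =====
-- pathway_dict[k]['name'] = pathway_dict[k]['name'] + f" ({k})"  (dict update at key k: first match)
def pvUpdA (key : String) : List (String × List (String × String)) → List (String × List (String × String))
  | [] => []
  | kv :: rest => if kv.1 == key then pvRename kv :: rest else kv :: pvUpdA key rest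

def repair_smpdb_name (pathway_dict : List (String × List (String × String))) : List (String × List (String × String)) :=
  -- smp_dict = {k: v['name'] for k, v in pathway_dict.items() if k.startswith('SMP')}
  let smp_dict : List (String × String) :=
    pathway_dict.foldl (fun acc kv => if pvIsSMP kv.1 then acc ++ [(kv.1, pvGetName kv.2)] else acc) []
  -- reverse_map = defaultdict(list); for key, value in smp_dict.items(): reverse_map[value].append(key)
  let reverse_map : PySem.Dict String (List String) :=
    smp_dict.foldl (fun rm kn => rm.insert kn.2 (rm.getD kn.2 [] ++ [kn.1])) PySem.Dict.empty
  -- result = [values for values in reverse_map.values() if len(values) > 1]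
  let result1 : List (List String) := reverse_map.values.filter (fun vs => vs.length > 1)
  -- result = [item for sublist in result for item in sublist]
  let result : List String := result1.flatten
  -- for k in result: pathway_dict[k]['name'] = pathway_dict[k]['name'] + f" ({k})"
  result.foldl (fun pd k => pvUpdA k pd) pathway_dict

-- ===== PORT B =====
def repair_smpdb_name_alt (pathway_dict : List (String × List (String × String))) : List (String × List (String × String)) :=
  -- smp_pairs = [(k, v['name']) for k, v in pathway_dict.items() if k.startswith('SMP')]
  let smp_pairs : List (String × String) :=
    (pathway_dict.filter (fun kv => pvIsSMP kv.1)).map (fun kv => (kv.1, pvGetName kv.2))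
  -- for k, v in pathway_dict.items():
  --   if k.startswith('SMP') and any(k2 != k and name == v['name'] for k2, name in smp_pairs):
  --     v['name'] = v['name'] + f" ({k})"
  pathway_dict.map (fun kv =>
    if pvIsSMP kv.1 && smp_pairs.any (fun p => (p.1 != kv.1) && (p.2 == pvGetName kv.2))
    then pvRename kv else kv)

-- ===== PRECONDITION & SPEC =====
-- Pre_ states the dict shape of the Python argument (a dict of dicts has no duplicate keys) and
-- excludes exactly the inputs where A raises KeyError: an SMP-prefixed entry without a 'name' key.
def Pre_repair_smpdb_name (pathway_dict : List (String × List (String × String))) : Prop :=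
  (pathway_dict.map Prod.fst).Nodup ∧
  ∀ kv ∈ pathway_dict, (kv.2.map Prod.fst).Nodup ∧
    (pvIsSMP kv.1 = true → "name" ∈ kv.2.map Prod.fst)
instance (pathway_dict : List (String × List (String × String))) : Decidable (Pre_repair_smpdb_name pathway_dict) := by unfold Pre_repair_smpdb_name; infer_instance

def pvWitness_repair_smpdb_name : (List (String × List (String × String))) :=
  [("SMP1", [("name", "a")]), ("SMP2", [("name", "a")]), ("PW3", [("name", "a")])]

def Spec_repair_smpdb_name (pathway_dict : List (String × List (String × String))) (out : List (String × List (String × String))) : Prop := out = repair_smpdb_name_alt pathway_dict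
instance (pathway_dict : List (String × List (String × String))) (out : List (String × List (String × String))) : Decidable (Spec_repair_smpdb_name pathway_dict out) := by unfold Spec_repair_smpdb_name; infer_instance

-- ===== CLAIM (what is proved, stated in full; the proofs are below) =====
def Claim_equal_repair_smpdb_name : Prop := ∀ (pathway_dict : List (String × List (String × String))), Dom_repair_smpdb_name pathway_dict → Pre_repair_smpdb_name pathway_dict → Spec_repair_smpdb_name pathway_dict (repair_smpdb_name pathway_dict)

-- ===== LEMMAS AND PROOFS =====

-- the list of (key, name) pairs A's smp_dict comprehension produces (= B's smp_pairs)
def pvSmpL (pd : List (String × List (String × String))) : List (String × String) :=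
  (pd.filter (fun kv => pvIsSMP kv.1)).map (fun kv => (kv.1, pvGetName kv.2))

-- the key list reverse_map associates with a name n
def pvGroup (l : List (String × String)) (n : String) : List String :=
  (l.filter (fun kn => kn.2 == n)).map Prod.fst

theorem pvSmp_fold (pd : List (String × List (String × String))) :
    pd.foldl (fun acc kv => if pvIsSMP kv.1 then acc ++ [(kv.1, pvGetName kv.2)] else acc) [] = pvSmpL pd := by
  simpa [pvSmpL] using
    PySem.List.foldl_append_if (fun kv : String × List (String × String) => pvIsSMP kv.1)
      (fun kv => (kv.1, pvGetName kv.2)) pd []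

theorem pvGroup_append (l : List (String × String)) (x : String × String) (n : String) :
    pvGroup (l ++ [x]) n = pvGroup l n ++ (if x.2 = n then [x.1] else []) := by
  simp only [pvGroup, List.filter_append, List.map_append]
  congr 1
  split_ifs with h
  · have hb : (x.2 == n) = true := by simpa using h
    simp [List.filter, hb]
  · have hb : (x.2 == n) = false := by simpa using h
    simp [List.filter, hb]

theorem pvGroup_of_not_mem (l : List (String × String)) (n : String) (h : n ∉ l.map Prod.snd) :
    pvGroup l n = [] := by
  simp only [pvGroup, List.map_eq_nil_iff, List.filter_eq_nil_iff]
  intro kn hkn hbeq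
  exact h (by
    have : kn.2 = n := by simpa using hbeq
    simpa [this] using List.mem_map_of_mem (f := Prod.snd) hkn)

theorem pvMem_group (l : List (String × String)) (n k : String) :
    k ∈ pvGroup l n ↔ (k, n) ∈ l := by
  constructor
  · intro hk
    simp only [pvGroup, List.mem_map, List.mem_filter] at hk
    obtain ⟨kn, ⟨hkn, hbeq⟩, hfst⟩ := hk
    have h2 : kn.2 = n := by simpa using hbeq
    have : kn = (k, n) := by
      cases kn; simp_all
    exact this ▸ hkn
  · intro h
    simp only [pvGroup, List.mem_map, List.mem_filter]
    exact ⟨(k, n), ⟨h, by simp⟩, rfl⟩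

theorem pvGroup_nodup (l : List (String × String)) (n : String) (h : (l.map Prod.fst).Nodup) :
    (pvGroup l n).Nodup := by
  have hs : (pvGroup l n).Sublist (l.map Prod.fst) :=
    List.Sublist.map Prod.fst (List.filter_sublist (p := fun kn => kn.2 == n) (l := l))
  exact h.sublist hs

-- a nodup list containing a, of length > 1, contains an element ≠ a; and conversely
theorem pvOne_lt_iff_other {α : Type} (L : List α) (a : α) (hnd : L.Nodup) (ha : a ∈ L) :
    1 < L.length ↔ ∃ b ∈ L, b ≠ a := by
  constructor
  · intro hlen
    by_contra hno
    have hall : ∀ b ∈ L, b = a := fun b hb => by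
      by_contra hba
      exact hno ⟨b, hb, hba⟩
    cases L with
    | nil => simp at ha
    | cons x xs =>
      have hx : x = a := hall x (List.mem_cons_self ..)
      have hxs : xs = [] := by
        cases xs with
        | nil => rfl
        | cons y ys =>
          have hy : y = a := hall y (by simp)
          have : x ∉ (y :: ys) := (List.nodup_cons.mp hnd).1
          exact absurd (by simp [hx, hy]) this
      simp [hxs] at hlen
  · rintro ⟨b, hb, hba⟩
    rcases List.mem_iff_append.mp ha with ⟨s, t, rfl⟩
    have hbst : b ∈ s ∨ b ∈ t := by
      rcases List.mem_append.mp hb with h | h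
      · exact Or.inl h
      · rcases List.mem_cons.mp h with h | h
        · exact absurd h hba
        · exact Or.inr h
    rcases hbst with h | h <;>
      · have := List.length_pos_of_mem h
        simp [List.length_append]
        omega

-- find? over the group-shaped item list
theorem pvFind_group (D : List String) (g : String → List String) (n : String) (hD : D.Nodup) :
    List.find? (fun p => p.1 == n) (D.map (fun n' => (n', g n'))) =
      if n ∈ D then some (n, g n) else none := by
  induction D with
  | nil => simp
  | cons d D ih =>
    by_cases hdn : d = n
    · subst hdn; simp
    · have := ih hD.of_cons
      simp [hdn, this, Ne.symm hdn, List.mem_cons]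

-- the reverse_map fold, fully characterised
theorem pvGroup_items (l : List (String × String)) :
    (l.foldl (fun rm kn => rm.insert kn.2 (rm.getD kn.2 [] ++ [kn.1])) PySem.Dict.empty).items =
      (PySem.List.dedup (l.map Prod.snd)).map (fun n => (n, pvGroup l n)) := by
  induction l using List.reverseRecOn with
  | nil => simp [PySem.List.dedup, PySem.Set.ofList, PySem.Dict.empty, pvGroup]
  | append_singleton l x ih =>
    rw [List.foldl_append]
    obtain ⟨k, n⟩ := x
    revert ih
    generalize (List.foldl (fun rm kn => rm.insert kn.2 (rm.getD kn.2 [] ++ [kn.1]))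
      (PySem.Dict.empty (κ := String) (ν := List String)) l) = RM
    intro ih
    set D := PySem.List.dedup (l.map Prod.snd) with hDdef
    have hD : D.Nodup := PySem.List.nodup_dedup _
    have hfind : List.find? (fun p => p.1 == n) (D.map (fun n' => (n', pvGroup l n')))
        = if n ∈ D then some (n, pvGroup l n) else none := pvFind_group D (fun n' => pvGroup l n') n hD
    have hcontains : RM.contains n = decide (n ∈ D) := by
      simp only [PySem.Dict.contains, ih]
      by_cases hn : n ∈ D
      · simp only [hn, decide_true]
        rw [List.any_eq_true]
        exact ⟨(n, pvGroup l n), List.mem_map_of_mem hn, by simp⟩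
      · simp only [hn, decide_false]
        rw [List.any_eq_false]
        intro p hp
        simp only [List.mem_map] at hp
        obtain ⟨n', hn', rfl⟩ := hp
        intro h
        have h' : n' = n := by simpa using h
        exact hn (h' ▸ hn')
    have hgetD : RM.getD n [] = pvGroup l n := by
      rw [PySem.Dict.getD, PySem.Dict.get?, ih, hfind]
      by_cases hn : n ∈ D
      · simp [hn]
      · have hg : pvGroup l n = [] := pvGroup_of_not_mem l n (by simpa [hDdef, PySem.List.mem_dedup] using hn)
        simp [hn, hg]
    have hded : PySem.List.dedup ((l ++ [(k, n)]).map Prod.snd)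
        = if n ∈ D then D else D ++ [n] := by
      simp only [List.map_append, List.map_cons, List.map_nil]
      show PySem.Set.ofList (l.map Prod.snd ++ [n]) = _
      rw [PySem.Set.ofList, List.foldl_append]
      rw [show List.foldl PySem.Set.add PySem.Set.empty (l.map Prod.snd) = D from rfl]
      simp only [List.foldl_cons, List.foldl_nil, PySem.Set.add]
      by_cases hn : n ∈ D <;> simp [hn]
    simp only [List.foldl_cons, List.foldl_nil, hded]
    rw [PySem.Dict.insert, hcontains, hgetD]
    by_cases hn : n ∈ D
    · have hc : decide (n ∈ D) = true := by simp [hn]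
      rw [hc, if_pos rfl, if_pos hn, ih]
      dsimp only
      rw [List.map_map]
      apply List.map_congr_left
      intro n' hn'
      by_cases h' : n' = n
      · subst h'
        have hb : ((n', pvGroup l n').1 == n') = true := by simp
        simp only [Function.comp, hb]
        rw [pvGroup_append]
        simp
      · have hb : ((n', pvGroup l n').1 == n) = false := by simpa using h'
        simp only [Function.comp, hb]
        rw [pvGroup_append]
        simp [Ne.symm h']
    · have hc : decide (n ∈ D) = false := decide_eq_false hn
      rw [hc, if_neg (by simp), if_neg hn, ih]
      dsimp only
      rw [List.map_append]
      congr 1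
      · apply List.map_congr_left
        intro n' hn'
        have h' : n' ≠ n := fun h => hn (h ▸ hn')
        rw [pvGroup_append]
        simp [Ne.symm h']
      · have hgl : pvGroup l n = [] :=
          pvGroup_of_not_mem l n (by simpa [hDdef, PySem.List.mem_dedup] using hn)
        rw [List.map_cons, List.map_nil, pvGroup_append]
        simp [hgl]

-- A's final update loop at a single key, under Nodup keys, is a map
theorem pvUpdA_map (key : String) (pd : List (String × List (String × String)))
    (h : (pd.map Prod.fst).Nodup) :
    pvUpdA key pd = pd.map (fun kv => if kv.1 = key then pvRename kv else kv) := by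
  induction pd with
  | nil => rfl
  | cons kv rest ih =>
    have hcons : pvUpdA key (kv :: rest)
        = if (kv.1 == key) = true then pvRename kv :: rest else kv :: pvUpdA key rest := rfl
    have h' : (kv.1 :: rest.map Prod.fst).Nodup := by simpa using h
    by_cases hk : kv.1 = key
    · have hb : (kv.1 == key) = true := by simpa using hk
      have hkey : key ∉ rest.map Prod.fst := by
        have := (List.nodup_cons.mp h').1
        simpa [hk] using this
      rw [hcons, if_pos hb, List.map_cons, if_pos hk]
      congr 1
      rw [List.map_congr_left (g := id), List.map_id]
      intro kv' hkv'
      have hne : kv'.1 ≠ key := fun hh => hkey (hh ▸ List.mem_map_of_mem hkv')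
      simp [hne]
    · have hb : (kv.1 == key) = false := by simpa using hk
      rw [hcons, if_neg (by simp [hb]), List.map_cons, if_neg hk]
      congr 1
      exact ih (List.nodup_cons.mp h').2

-- keys are preserved by the conditional-rename map
theorem pvKeys_map_rename (pd : List (String × List (String × String)))
    (c : String × List (String × String) → Prop) [DecidablePred c] :
    ((pd.map (fun kv => if c kv then pvRename kv else kv)).map Prod.fst) = pd.map Prod.fst := by
  rw [List.map_map]
  apply List.map_congr_left
  intro kv _
  by_cases h : c kv <;> simp [h, pvRename]

-- A's whole update loop over a duplicate-free key list is a single map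
theorem pvFold_updA (L : List String) (pd : List (String × List (String × String)))
    (hpd : (pd.map Prod.fst).Nodup) (hL : L.Nodup) :
    L.foldl (fun pd k => pvUpdA k pd) pd =
      pd.map (fun kv => if kv.1 ∈ L then pvRename kv else kv) := by
  induction L generalizing pd with
  | nil =>
    simp only [List.foldl_nil]
    rw [List.map_congr_left (g := id), List.map_id]
    intro kv _; simp
  | cons k L ih =>
    simp only [List.foldl_cons]
    rw [pvUpdA_map k pd hpd]
    have hkeys : ((pd.map (fun kv => if kv.1 = k then pvRename kv else kv)).map Prod.fst) = pd.map Prod.fst :=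
      pvKeys_map_rename pd (fun kv => kv.1 = k)
    rw [ih _ (by rw [hkeys]; exact hpd) (List.nodup_cons.mp hL).2]
    rw [List.map_map]
    apply List.map_congr_left
    intro kv _
    by_cases hk : kv.1 = k
    · have h1 : kv.1 ∈ k :: L := by simp [hk]
      have h2 : (pvRename kv).1 ∉ L := by
        simp only [pvRename]
        rw [hk]
        exact (List.nodup_cons.mp hL).1
      simp only [Function.comp, if_pos hk, if_neg h2, if_pos h1]
    · by_cases hL' : kv.1 ∈ L
      · have h1 : kv.1 ∈ k :: L := List.mem_cons_of_mem _ hL'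
        simp only [Function.comp, if_neg hk, if_pos hL', if_pos h1]
      · have h1 : kv.1 ∉ k :: L := by
          simp only [List.mem_cons]
          rintro (h | h) <;> [exact hk h; exact hL' h]
        simp only [Function.comp, if_neg hk, if_neg hL', if_neg h1]

-- membership in A's flattened duplicate-key list, for an entry of the dict, equals B's
-- existential test: the entry is SMP and some OTHER snapshot pair carries its name
theorem pvMem_result (pd : List (String × List (String × String)))
    (hkeys : (pd.map Prod.fst).Nodup) (kv : String × List (String × String)) (hkv : kv ∈ pd) :
    (kv.1 ∈ ((((PySem.List.dedup ((pvSmpL pd).map Prod.snd)).map (fun n => pvGroup (pvSmpL pd) n)).filter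
        (fun vs => vs.length > 1)).flatten)
      ↔ (pvIsSMP kv.1 = true ∧ ∃ p ∈ pvSmpL pd, p.1 ≠ kv.1 ∧ p.2 = pvGetName kv.2)) := by
  set l := pvSmpL pd with hl
  have hlkeys : (l.map Prod.fst).Nodup := by
    have hsub : (l.map Prod.fst).Sublist (pd.map Prod.fst) := by
      rw [hl, pvSmpL, List.map_map]
      have : (Prod.fst ∘ fun kv : String × List (String × String) => (kv.1, pvGetName kv.2))
          = Prod.fst := rfl
      rw [this]
      exact List.Sublist.map Prod.fst (List.filter_sublist)
    exact hkeys.sublist hsub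
  constructor
  · intro hmem
    rw [List.mem_flatten] at hmem
    obtain ⟨gl, hgl, hkgl⟩ := hmem
    rw [List.mem_filter] at hgl
    obtain ⟨hglm, hlen⟩ := hgl
    rw [List.mem_map] at hglm
    obtain ⟨n, hn, rfl⟩ := hglm
    have hpair : (kv.1, n) ∈ l := (pvMem_group l n kv.1).mp hkgl
    have hsmp : pvIsSMP kv.1 = true ∧ n = pvGetName kv.2 := by
      rw [hl, pvSmpL, List.mem_map] at hpair
      obtain ⟨kv', hkv', heq⟩ := hpair
      rw [List.mem_filter] at hkv'
      have hpe := Prod.ext_iff.mp heq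
      have hkveq : kv' = kv := List.inj_on_of_nodup_map hkeys hkv'.1 hkv hpe.1
      exact ⟨hkveq ▸ hkv'.2, by simpa [hkveq] using hpe.2.symm⟩
    refine ⟨hsmp.1, ?_⟩
    have hlen' : 1 < (pvGroup l n).length := by simpa using hlen
    obtain ⟨k2, hk2, hk2ne⟩ :=
      (pvOne_lt_iff_other (pvGroup l n) kv.1 (pvGroup_nodup l n hlkeys) hkgl).mp hlen'
    exact ⟨(k2, n), (pvMem_group l n k2).mp hk2, hk2ne, hsmp.2⟩
  · rintro ⟨hsmp, p, hp, hpne, hpn⟩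
    have hkvf : kv ∈ pd.filter (fun kv => pvIsSMP kv.1) := List.mem_filter.mpr ⟨hkv, hsmp⟩
    set n := pvGetName kv.2 with hn
    have hpair : (kv.1, n) ∈ l := by
      rw [hl, pvSmpL, List.mem_map]
      exact ⟨kv, hkvf, rfl⟩
    have hself : kv.1 ∈ pvGroup l n := (pvMem_group l n kv.1).mpr hpair
    have hother : p.1 ∈ pvGroup l n := by
      refine (pvMem_group l n p.1).mpr ?_
      have : p = (p.1, n) := by
        cases p; simp_all
      exact this ▸ hp
    have hlen : 1 < (pvGroup l n).length :=
      (pvOne_lt_iff_other (pvGroup l n) kv.1 (pvGroup_nodup l n hlkeys) hself).mpr ⟨p.1, hother, hpne⟩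
    have hnmem : n ∈ l.map Prod.snd := by
      rw [List.mem_map]; exact ⟨(kv.1, n), hpair, rfl⟩
    rw [List.mem_flatten]
    refine ⟨pvGroup l n, List.mem_filter.mpr ⟨List.mem_map_of_mem ((PySem.List.mem_dedup _ _).mpr hnmem), ?_⟩,
      hself⟩
    simpa using hlen

-- ===== VERDICT (by name: the statement is the Claim_ definition above) =====
theorem repair_smpdb_name_spec : Claim_equal_repair_smpdb_name := by
  unfold Claim_equal_repair_smpdb_name
  intro pd _ hpre
  unfold Spec_repair_smpdb_name
  obtain ⟨hkeys, -⟩ := hpre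
  set l := pvSmpL pd with hl
  set D := PySem.List.dedup (l.map Prod.snd) with hD
  set result := ((D.map (fun n => pvGroup l n)).filter (fun vs => vs.length > 1)).flatten with hres
  have hlkeys : (l.map Prod.fst).Nodup := by
    have hsub : (l.map Prod.fst).Sublist (pd.map Prod.fst) := by
      rw [hl, pvSmpL, List.map_map]
      have : (Prod.fst ∘ fun kv : String × List (String × String) => (kv.1, pvGetName kv.2))
          = Prod.fst := rfl
      rw [this]
      exact List.Sublist.map Prod.fst (List.filter_sublist)
    exact hkeys.sublist hsub
  -- A reduces to one update fold over result
  have hA : repair_smpdb_name pd = result.foldl (fun pd k => pvUpdA k pd) pd := by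
    unfold repair_smpdb_name
    simp only [pvSmp_fold, pvGroup_items, PySem.Dict.values, List.map_map]
    rfl
  -- result has no duplicate keys
  have hresnd : result.Nodup := by
    rw [hres, List.nodup_flatten]
    constructor
    · intro gl hgl
      rw [List.mem_filter] at hgl
      obtain ⟨hglm, -⟩ := hgl
      rw [List.mem_map] at hglm
      obtain ⟨n, -, rfl⟩ := hglm
      exact pvGroup_nodup l n hlkeys
    · apply List.Pairwise.filter
      rw [List.pairwise_map]
      refine List.Pairwise.imp ?_ (PySem.List.nodup_dedup (l.map Prod.snd))
      intro n n' hnn' k hk hk'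
      have h1 : (k, n) ∈ l := (pvMem_group l n k).mp hk
      have h2 : (k, n') ∈ l := (pvMem_group l n' k).mp hk'
      have : (k, n) = (k, n') := List.inj_on_of_nodup_map hlkeys h1 h2 rfl
      exact hnn' (congrArg Prod.snd this)
  rw [hA, pvFold_updA result pd hkeys hresnd]
  -- B is the same conditional map: its Bool test decides membership in result
  unfold repair_smpdb_name_alt
  show _ = List.map
      (fun kv => if (pvIsSMP kv.1 && l.any fun p => p.1 != kv.1 && p.2 == pvGetName kv.2) = true
        then pvRename kv else kv) pd
  apply List.map_congr_left
  intro kv hkv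
  have hiff := pvMem_result pd hkeys kv hkv
  rw [← hl, ← hD, ← hres] at hiff
  by_cases hc : kv.1 ∈ result
  · rw [if_pos hc, if_pos]
    obtain ⟨h1, p, hp, hpne, hpn⟩ := hiff.mp hc
    simp only [Bool.and_eq_true, List.any_eq_true, bne_iff_ne, beq_iff_eq]
    exact ⟨h1, p, hp, hpne, hpn⟩
  · rw [if_neg hc, if_neg]
    intro h
    simp only [Bool.and_eq_true, List.any_eq_true, bne_iff_ne, beq_iff_eq] at h
    exact hc (hiff.mpr ⟨h.1, h.2⟩)
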